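-- pv_equiv track=rewrite | github.com/AdolfMarshal/Vocalis-X | vocalis-X/vocalis-x/melody_composer.py | _build_chord_notes
-- ===== SOURCE A (Python) =====
-- SWEET_MIN  = 60   # C4 — comfortable floor
--
-- SWEET_MAX  = 72   # C5 — comfortable ceiling
--
-- def _build_chord_notes(root_pc: int, intervals: list) -> list:
--     """All MIDI notes for this chord within Rena's sweet zone."""
--     notes = set()
--     for octave in range(3, 8):
--         for iv in intervals:
--             n = root_pc + iv + octave * 12
--             if SWEET_MIN <= n <= SWEET_MAX:
--                 notes.add(n)
--     return sorted(notes)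
-- ===== SOURCE B (Python) =====
-- SWEET_MIN = 60
-- SWEET_MAX = 72
--
-- def _build_chord_notes(root_pc: int, intervals: list) -> list:
--     """All MIDI notes for this chord within Rena's sweet zone."""
--     notes = set()
--     for iv in intervals:
--         base = root_pc + iv
--         lo = max(3, -((base - SWEET_MIN) // 12))      # ceil((60 - base) / 12)
--         hi = min(7, (SWEET_MAX - base) // 12)         # floor((72 - base) / 12)
--         for o in range(lo, hi + 1):
--             notes.add(base + 12 * o)
--     return sorted(notes)
-- ===== Notes on version B (the rewrite author's own statement) =====
-- stated objective: alternative
-- what changed: Instead of scanning all five octaves and filtering each candidate note against the sweet zone, B computes for each interval the exact octave band [lo,hi] whose notes land in [60,72] by ceiling/floor division, clamped to [3,7], and adds only those notes.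
import Mathlib
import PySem

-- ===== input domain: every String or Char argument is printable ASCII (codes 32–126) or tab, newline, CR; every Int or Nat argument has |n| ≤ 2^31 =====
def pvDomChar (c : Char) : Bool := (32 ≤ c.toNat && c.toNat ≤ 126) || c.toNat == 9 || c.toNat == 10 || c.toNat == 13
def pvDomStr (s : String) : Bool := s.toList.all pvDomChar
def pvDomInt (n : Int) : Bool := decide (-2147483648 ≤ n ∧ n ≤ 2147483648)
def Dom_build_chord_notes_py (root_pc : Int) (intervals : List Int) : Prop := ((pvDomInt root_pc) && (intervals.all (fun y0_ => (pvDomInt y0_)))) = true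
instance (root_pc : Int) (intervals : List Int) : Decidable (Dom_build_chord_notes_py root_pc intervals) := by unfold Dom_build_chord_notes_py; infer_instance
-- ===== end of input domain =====

-- B replaces A's scan of all five octaves with a direct arithmetic computation of the
-- octave band whose notes fall in the sweet zone (alternative decomposition, same cost class).

-- ===== PORT A =====
def build_chord_notes_py (root_pc : Int) (intervals : List Int) : List Int :=
  let notes : PySem.Set Int :=
    (PySem.List.pyRange 3 8 1).foldl (fun notes octave =>
      intervals.foldl (fun notes iv =>
        let n := root_pc + iv + octave * 12
        if 60 ≤ n ∧ n ≤ 72 then PySem.Set.add notes n else notes) notes)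
      PySem.Set.empty
  PySem.List.sorted notes (fun x => x) false

-- ===== PORT B =====
def build_chord_notes_py_alt (root_pc : Int) (intervals : List Int) : List Int :=
  let notes : PySem.Set Int :=
    intervals.foldl (fun notes iv =>
      let base := root_pc + iv
      let lo := max 3 (-(PySem.Int.floordiv (base - 60) 12))
      let hi := min 7 (PySem.Int.floordiv (72 - base) 12)
      (PySem.List.pyRange lo (hi + 1) 1).foldl (fun notes o =>
        PySem.Set.add notes (base + 12 * o)) notes)
      PySem.Set.empty
  PySem.List.sorted notes (fun x => x) false

-- ===== PRECONDITION & SPEC =====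
def Spec_build_chord_notes_py (root_pc : Int) (intervals : List Int) (out : List Int) : Prop := out = build_chord_notes_py_alt root_pc intervals
instance (root_pc : Int) (intervals : List Int) (out : List Int) : Decidable (Spec_build_chord_notes_py root_pc intervals out) := by unfold Spec_build_chord_notes_py; infer_instance

-- ===== CLAIM (what is proved, stated in full; the proofs are below) =====
def Claim_equal_build_chord_notes_py : Prop := ∀ (root_pc : Int) (intervals : List Int), Dom_build_chord_notes_py root_pc intervals → Spec_build_chord_notes_py root_pc intervals (build_chord_notes_py root_pc intervals)

-- ===== LEMMAS AND PROOFS =====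

-- generic: membership in a fold of set-updates, given a per-step membership law
theorem mem_foldl_of_step {α β : Type} [BEq α] [LawfulBEq α]
    (F : PySem.Set α → β → PySem.Set α) (Q : β → α → Prop)
    (hstep : ∀ s y x, x ∈ F s y ↔ x ∈ s ∨ Q y x) :
    ∀ (l : List β) (s : PySem.Set α) (x : α),
      x ∈ l.foldl F s ↔ x ∈ s ∨ ∃ y ∈ l, Q y x := by
  intro l
  induction l with
  | nil => simp
  | cons h t ih =>
    intro s x
    simp only [List.foldl_cons, ih, hstep, List.mem_cons]
    constructor
    · rintro ((hs | hq) | ⟨y, hy, hQ⟩)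
      · exact Or.inl hs
      · exact Or.inr ⟨h, Or.inl rfl, hq⟩
      · exact Or.inr ⟨y, Or.inr hy, hQ⟩
    · rintro (hs | ⟨y, (rfl | hy), hQ⟩)
      · exact Or.inl (Or.inl hs)
      · exact Or.inl (Or.inr hQ)
      · exact Or.inr ⟨y, hy, hQ⟩

-- generic: a fold of set-updates preserves Nodup, given a per-step preservation law
theorem nodup_foldl_of_step {α β : Type}
    (F : PySem.Set α → β → PySem.Set α)
    (hstep : ∀ s y, s.Nodup → (F s y).Nodup) :
    ∀ (l : List β) (s : PySem.Set α), s.Nodup → (l.foldl F s).Nodup := by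
  intro l
  induction l with
  | nil => intro s hs; simpa using hs
  | cons h t ih => intro s hs; exact ih _ (hstep _ _ hs)

theorem mem_Aset (root_pc : Int) (intervals : List Int) (x : Int) :
    x ∈ ((PySem.List.pyRange 3 8 1).foldl (fun notes octave =>
        intervals.foldl (fun notes iv =>
          let n := root_pc + iv + octave * 12
          if 60 ≤ n ∧ n ≤ 72 then PySem.Set.add notes n else notes) notes)
        (PySem.Set.empty : PySem.Set Int)) ↔
      ∃ octave, 3 ≤ octave ∧ octave < 8 ∧ ∃ iv ∈ intervals,
        (60 ≤ root_pc + iv + octave * 12 ∧ root_pc + iv + octave * 12 ≤ 72) ∧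
        x = root_pc + iv + octave * 12 := by
  rw [mem_foldl_of_step _
    (fun octave x => ∃ iv ∈ intervals,
        (60 ≤ root_pc + iv + octave * 12 ∧ root_pc + iv + octave * 12 ≤ 72) ∧
        x = root_pc + iv + octave * 12)
    (by
      intro s octave x
      rw [mem_foldl_of_step _
        (fun iv x => (60 ≤ root_pc + iv + octave * 12 ∧ root_pc + iv + octave * 12 ≤ 72) ∧
          x = root_pc + iv + octave * 12)
        (by
          intro s iv x
          by_cases h : 60 ≤ root_pc + iv + octave * 12 ∧ root_pc + iv + octave * 12 ≤ 72
          · rw [if_pos h]; simp only [PySem.Set.mem_add]; tauto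
          · rw [if_neg h]; tauto)])]
  constructor
  · rintro (h | ⟨o, ho, hq⟩)
    · simp [PySem.Set.empty] at h
    · rw [PySem.List.mem_pyRange_one] at ho
      exact ⟨o, ho.1, ho.2, hq⟩
  · rintro ⟨o, h1, h2, hq⟩
    exact Or.inr ⟨o, PySem.List.mem_pyRange_one.mpr ⟨h1, h2⟩, hq⟩

theorem mem_Bset (root_pc : Int) (intervals : List Int) (x : Int) :
    x ∈ (intervals.foldl (fun notes iv =>
        let base := root_pc + iv
        let lo := max 3 (-(PySem.Int.floordiv (base - 60) 12))
        let hi := min 7 (PySem.Int.floordiv (72 - base) 12)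
        (PySem.List.pyRange lo (hi + 1) 1).foldl (fun notes o =>
          PySem.Set.add notes (base + 12 * o)) notes)
        (PySem.Set.empty : PySem.Set Int)) ↔
      ∃ iv ∈ intervals, ∃ o,
        max 3 (-(PySem.Int.floordiv (root_pc + iv - 60) 12)) ≤ o ∧
        o < min 7 (PySem.Int.floordiv (72 - (root_pc + iv)) 12) + 1 ∧
        x = root_pc + iv + 12 * o := by
  rw [mem_foldl_of_step _
    (fun iv x => ∃ o,
        max 3 (-(PySem.Int.floordiv (root_pc + iv - 60) 12)) ≤ o ∧
        o < min 7 (PySem.Int.floordiv (72 - (root_pc + iv)) 12) + 1 ∧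
        x = root_pc + iv + 12 * o)
    (by
      intro s iv x
      rw [mem_foldl_of_step _
        (fun o x => x = root_pc + iv + 12 * o)
        (by intro s o x; simp [PySem.Set.mem_add])]
      constructor
      · rintro (h | ⟨o, ho, rfl⟩)
        · exact Or.inl h
        · rw [PySem.List.mem_pyRange_one] at ho
          exact Or.inr ⟨o, ho.1, ho.2, rfl⟩
      · rintro (h | ⟨o, h1, h2, rfl⟩)
        · exact Or.inl h
        · exact Or.inr ⟨o, PySem.List.mem_pyRange_one.mpr ⟨h1, h2⟩, rfl⟩)]
  constructor
  · rintro (h | hq)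
    · simp [PySem.Set.empty] at h
    · exact hq
  · exact Or.inr

theorem band_equiv (base x : Int) :
    (∃ octave, 3 ≤ octave ∧ octave < 8 ∧
        (60 ≤ base + octave * 12 ∧ base + octave * 12 ≤ 72) ∧ x = base + octave * 12) ↔
    (∃ o, max 3 (-(PySem.Int.floordiv (base - 60) 12)) ≤ o ∧
        o < min 7 (PySem.Int.floordiv (72 - base) 12) + 1 ∧ x = base + 12 * o) := by
  rw [PySem.Int.floordiv_eq_ediv_of_pos (b := 12) (by norm_num),
      PySem.Int.floordiv_eq_ediv_of_pos (b := 12) (by norm_num)]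
  constructor
  · rintro ⟨o, h1, h2, ⟨h3, h4⟩, rfl⟩
    exact ⟨o, by omega, by omega, by ring⟩
  · rintro ⟨o, h1, h2, rfl⟩
    exact ⟨o, by omega, by omega, ⟨by omega, by omega⟩, by ring⟩

theorem sets_perm (root_pc : Int) (intervals : List Int) :
    List.Perm
      ((PySem.List.pyRange 3 8 1).foldl (fun notes octave =>
        intervals.foldl (fun notes iv =>
          let n := root_pc + iv + octave * 12
          if 60 ≤ n ∧ n ≤ 72 then PySem.Set.add notes n else notes) notes)
        (PySem.Set.empty : PySem.Set Int))
      (intervals.foldl (fun notes iv =>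
        let base := root_pc + iv
        let lo := max 3 (-(PySem.Int.floordiv (base - 60) 12))
        let hi := min 7 (PySem.Int.floordiv (72 - base) 12)
        (PySem.List.pyRange lo (hi + 1) 1).foldl (fun notes o =>
          PySem.Set.add notes (base + 12 * o)) notes)
        (PySem.Set.empty : PySem.Set Int)) := by
  apply (List.perm_ext_iff_of_nodup _ _).mpr
  · intro x
    rw [mem_Aset, mem_Bset]
    constructor
    · rintro ⟨o, h1, h2, iv, hiv, hb, hx⟩
      obtain ⟨o', ho'⟩ := (band_equiv (root_pc + iv) x).mp ⟨o, h1, h2, hb, hx⟩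
      exact ⟨iv, hiv, o', ho'⟩
    · rintro ⟨iv, hiv, o, ho⟩
      obtain ⟨o', h1, h2, hb, hx⟩ := (band_equiv (root_pc + iv) x).mpr ⟨o, ho⟩
      exact ⟨o', h1, h2, iv, hiv, hb, hx⟩
  · exact nodup_foldl_of_step _
      (fun s octave hs => nodup_foldl_of_step _
        (fun s iv hs => by
          dsimp only
          split
          · exact PySem.Set.nodup_add _ _ hs
          · exact hs) intervals s hs)
      _ _ (by simp [PySem.Set.empty])
  · exact nodup_foldl_of_step _
      (fun s iv hs => nodup_foldl_of_step _
        (fun s o hs => PySem.Set.nodup_add _ _ hs) _ s hs)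
      _ _ (by simp [PySem.Set.empty])

-- ===== VERDICT (by name: the statement is the Claim_ definition above) =====
theorem build_chord_notes_py_spec : Claim_equal_build_chord_notes_py := by
  intro root_pc intervals _
  unfold Spec_build_chord_notes_py build_chord_notes_py build_chord_notes_py_alt
  exact PySem.List.sorted_eq_sorted_of_perm _ _ _ (fun a b h => h)
    (sets_perm root_pc intervals)
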